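-- pv_equiv track=rewrite | github.com/a2sembly/mft_parser | mft2.py | LittleEndianToInteger
-- ===== SOURCE A (Python) =====
-- def LittleEndianToInteger(buf):
--     val=0
--     for i in range(0,len(buf)):
--         multi=1
--         for j in range(0,i):
--             multi*=256
--         val+=buf[i]*multi
--     return val
-- ===== SOURCE B (Python) =====
-- def LittleEndianToInteger(buf):
--     val = 0
--     for b in reversed(buf):
--         val = val * 256 + b
--     return val
-- ===== Notes on version B (the rewrite author's own statement) =====
-- stated objective: faster
-- what changed: Replaces the nested loop that recomputes 256**i from scratch for every byte with a single reversed pass using Horner's rule (val = val*256 + b).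
import Mathlib
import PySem

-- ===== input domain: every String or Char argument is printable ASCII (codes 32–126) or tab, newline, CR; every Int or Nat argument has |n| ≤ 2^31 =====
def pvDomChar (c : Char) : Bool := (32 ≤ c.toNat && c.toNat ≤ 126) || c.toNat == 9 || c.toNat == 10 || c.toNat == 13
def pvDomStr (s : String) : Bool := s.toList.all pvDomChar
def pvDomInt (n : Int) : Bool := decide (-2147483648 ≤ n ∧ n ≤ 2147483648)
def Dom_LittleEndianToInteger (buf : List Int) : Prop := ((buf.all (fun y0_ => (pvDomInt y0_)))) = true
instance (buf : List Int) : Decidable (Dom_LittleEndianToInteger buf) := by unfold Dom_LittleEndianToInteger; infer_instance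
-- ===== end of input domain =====

-- B replaces A's nested loop (recomputing 256**i for each byte) by one reversed Horner pass; objective: faster (asymptotic).

-- ===== PORT A =====
-- literal port of A: outer loop over range(0,len(buf)), inner loop rebuilding multi
def LittleEndianToInteger (buf : List Int) : Int :=
  (PySem.List.pyRange 0 buf.length 1).foldl
    (fun val i =>
      let multi := (PySem.List.pyRange 0 i 1).foldl (fun m _ => m * 256) 1
      val + PySem.List.pyGetD buf i 0 * multi) 0

-- ===== PORT B =====
-- port of Source B: val = 0; for b in reversed(buf): val = val*256 + b
def LittleEndianToInteger_alt (buf : List Int) : Int :=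
  buf.reverse.foldl (fun val b => val * 256 + b) 0

-- ===== PRECONDITION & SPEC =====
def Spec_LittleEndianToInteger (buf : List Int) (out : Int) : Prop := out = LittleEndianToInteger_alt buf
instance (buf : List Int) (out : Int) : Decidable (Spec_LittleEndianToInteger buf out) := by unfold Spec_LittleEndianToInteger; infer_instance

-- ===== CLAIM (what is proved, stated in full; the proofs are below) =====
def Claim_equal_LittleEndianToInteger : Prop := ∀ (buf : List Int), Dom_LittleEndianToInteger buf → Spec_LittleEndianToInteger buf (LittleEndianToInteger buf)

-- ===== LEMMAS AND PROOFS =====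

/-- Common normal form: the little-endian value, head = least significant byte. -/
def pvLE (buf : List Int) : Int :=
  match buf with
  | [] => 0
  | b :: t => b + 256 * pvLE t

theorem pvMulti_eq (l : List Int) (acc : Int) :
    l.foldl (fun a _ => a * 256) acc = acc * 256 ^ l.length := by
  induction l generalizing acc with
  | nil => simp
  | cons a t ih => simp [List.foldl, ih, pow_succ]; ring

theorem pvMulti_range (i : Int) :
    (PySem.List.pyRange 0 i 1).foldl (fun a _ => a * 256) ((1 : Int)) = (256 : Int) ^ i.toNat := by
  rw [pvMulti_eq]
  simp [PySem.List.length_pyRange_one]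

theorem pvSum_eq (buf : List Int) :
    ((List.range buf.length).map (fun k => buf.getD k 0 * 256 ^ k)).sum = pvLE buf := by
  induction buf with
  | nil => simp [pvLE]
  | cons b t ih =>
      rw [List.length_cons, List.range_succ_eq_map]
      simp only [List.map_cons, List.map_map, List.sum_cons]
      have : ((List.range t.length).map ((fun k => (b :: t).getD k 0 * 256 ^ k) ∘ Nat.succ)).sum
          = 256 * ((List.range t.length).map (fun k => t.getD k 0 * 256 ^ k)).sum := by
        rw [← List.sum_map_mul_left]
        congr 1
        apply List.map_congr_left
        intro k _
        simp [Function.comp, pow_succ]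
        ring
      rw [this, ih]
      simp [pvLE]

theorem pvA_eq (buf : List Int) : LittleEndianToInteger buf = pvLE buf := by
  unfold LittleEndianToInteger
  simp only [pvMulti_range]
  rw [PySem.List.foldl_add (g := fun i => PySem.List.pyGetD buf i 0 * 256 ^ i.toNat)]
  rw [PySem.List.pyRange_one]
  simp only [List.map_map, zero_add]
  have : ∀ k : Nat, ((fun i => PySem.List.pyGetD buf i 0 * 256 ^ i.toNat) ∘ (fun k : Nat => (k : Int))) k
      = buf.getD k 0 * 256 ^ k := by
    intro k
    simp [Function.comp, PySem.List.pyGetD_natCast]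
  rw [List.map_congr_left (fun k _ => this k)]
  have hlen : (((buf.length : Int) - 0).toNat) = buf.length := by simp
  rw [hlen, pvSum_eq]

theorem pvB_eq (buf : List Int) : LittleEndianToInteger_alt buf = pvLE buf := by
  induction buf with
  | nil => rfl
  | cons b t ih =>
      unfold LittleEndianToInteger_alt at *
      rw [List.reverse_cons, List.foldl_append]
      simp only [List.foldl]
      rw [ih]
      simp [pvLE]; ring

-- ===== VERDICT (by name: the statement is the Claim_ definition above) =====
theorem LittleEndianToInteger_spec : Claim_equal_LittleEndianToInteger := by
  intro buf _
  unfold Spec_LittleEndianToInteger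
  rw [pvA_eq, pvB_eq]
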